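-- pv_equiv track=rewrite | github.com/marzzuki/mazinger | mazinger/resegment.py | _validate_merge_groups
-- ===== SOURCE A (Python) =====
-- _MAX_MERGE_GROUP = 8
--
-- def _validate_merge_groups(groups: list, n: int) -> bool:
--     """Check that *groups* cover entries 1..n exactly once, in order."""
--     if not isinstance(groups, list):
--         return False
--     seen: set[int] = set()
--     prev_max = 0
--     for group in groups:
--         if not isinstance(group, list) or not group:
--             return False
--         if len(group) > _MAX_MERGE_GROUP:
--             return False
--         nums: list[int] = []
--         for idx in group:
--             if not isinstance(idx, (int, float)):
--                 return False
--             idx = int(idx)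
--             if idx < 1 or idx > n or idx in seen:
--                 return False
--             seen.add(idx)
--             nums.append(idx)
--         nums_sorted = sorted(nums)
--         if nums_sorted != list(range(nums_sorted[0], nums_sorted[-1] + 1)):
--             return False
--         if nums_sorted[0] <= prev_max:
--             return False
--         prev_max = nums_sorted[-1]
--     return len(seen) == n
-- ===== SOURCE B (Python) =====
-- _MAX_MERGE_GROUP = 8
--
-- def _validate_merge_groups(groups: list, n: int) -> bool:
--     """Check that *groups* cover entries 1..n exactly once, in order."""
--     if not isinstance(groups, list):
--         return False
--     expected = 1
--     for group in groups:
--         if not isinstance(group, list) or not group: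
--             return False
--         if len(group) > _MAX_MERGE_GROUP:
--             return False
--         nums = []
--         for idx in group:
--             if not isinstance(idx, (int, float)):
--                 return False
--             nums.append(int(idx))
--         if sorted(nums) != list(range(expected, expected + len(nums))):
--             return False
--         expected += len(nums)
--     return expected == n + 1
-- ===== Notes on version B (the rewrite author's own statement) =====
-- stated objective: simpler
-- what changed: B drops A's seen-set, prev_max and per-element range/duplicate checks; it keeps a single running `expected` counter, requires each group's sorted contents to equal the next contiguous block range(expected, expected+len(group)), and finally checks expected == n + 1.
import Mathlib
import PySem

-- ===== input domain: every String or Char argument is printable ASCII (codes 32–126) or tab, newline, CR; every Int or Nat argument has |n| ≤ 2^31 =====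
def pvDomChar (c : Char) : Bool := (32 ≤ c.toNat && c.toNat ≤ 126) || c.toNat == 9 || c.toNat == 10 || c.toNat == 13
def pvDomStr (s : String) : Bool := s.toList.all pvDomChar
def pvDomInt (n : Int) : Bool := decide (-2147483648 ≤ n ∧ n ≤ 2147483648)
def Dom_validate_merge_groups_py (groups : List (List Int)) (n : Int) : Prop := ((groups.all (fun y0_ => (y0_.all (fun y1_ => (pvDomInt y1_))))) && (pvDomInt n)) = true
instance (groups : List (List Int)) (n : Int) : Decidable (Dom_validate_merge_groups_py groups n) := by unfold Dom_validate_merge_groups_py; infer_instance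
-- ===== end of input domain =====

-- B replaces A's `seen` set and `prev_max` state by a single running `expected` counter
-- (each group's sorted contents must be the next contiguous block); objective: simpler.

-- ===== PORT A =====
-- the inner `for idx in group:` loop; `none` = the early `return False`
def pyA_inner (n : Int) (group : List Int) (seen : PySem.Set Int) (nums : List Int) :
    Option (PySem.Set Int × List Int) :=
  match group with
  | [] => some (seen, nums)
  | idx :: rest =>
    -- isinstance(idx, (int, float)) is always true here; int(idx) = idx on Int
    if idx < 1 ∨ idx > n ∨ PySem.Set.contains seen idx then none
    else pyA_inner n rest (PySem.Set.add seen idx) (nums ++ [idx])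

-- the outer `for group in groups:` loop carrying (seen, prev_max)
def pyA_loop (n : Int) (groups : List (List Int)) (seen : PySem.Set Int) (prev_max : Int) : Bool :=
  match groups with
  | [] => PySem.Set.len seen == n
  | group :: rest =>
    if group.isEmpty then false                 -- `not group`
    else if group.length > 8 then false         -- len(group) > _MAX_MERGE_GROUP
    else
      match pyA_inner n group seen [] with
      | none => false
      | some (seen', nums) =>
        let nums_sorted := PySem.List.sorted nums (fun x => x) false
        match PySem.List.pyGet? nums_sorted 0, PySem.List.pyGet? nums_sorted (-1) with
        | some a, some b =>
          if nums_sorted ≠ PySem.List.pyRange a (b + 1) 1 then false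
          else if a ≤ prev_max then false
          else pyA_loop n rest seen' b
        | _, _ => false    -- unreachable: group (hence nums) is nonempty

def validate_merge_groups_py (groups : List (List Int)) (n : Int) : Bool :=
  -- isinstance(groups, list) is always true here
  pyA_loop n groups PySem.Set.empty 0

-- ===== PORT B =====
def pyB_loop (n : Int) (groups : List (List Int)) (expected : Int) : Bool :=
  match groups with
  | [] => expected == n + 1
  | group :: rest =>
    if group.isEmpty then false
    else if group.length > 8 then false
    else
      -- nums: the appended int(idx) values; int(idx) = idx on Int
      let nums := group.foldl (fun acc idx => acc ++ [idx]) []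
      if PySem.List.sorted nums (fun x => x) false ≠
          PySem.List.pyRange expected (expected + nums.length) 1 then false
      else pyB_loop n rest (expected + nums.length)

def validate_merge_groups_py_alt (groups : List (List Int)) (n : Int) : Bool :=
  pyB_loop n groups 1

-- ===== PRECONDITION & SPEC =====
def Spec_validate_merge_groups_py (groups : List (List Int)) (n : Int) (out : Bool) : Prop := out = validate_merge_groups_py_alt groups n
instance (groups : List (List Int)) (n : Int) (out : Bool) : Decidable (Spec_validate_merge_groups_py groups n out) := by unfold Spec_validate_merge_groups_py; infer_instance

-- ===== CLAIM (what is proved, stated in full; the proofs are below) =====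
def Claim_equal_validate_merge_groups_py : Prop := ∀ (groups : List (List Int)) (n : Int), Dom_validate_merge_groups_py groups n → Spec_validate_merge_groups_py groups n (validate_merge_groups_py groups n)

-- ===== LEMMAS AND PROOFS =====

-- A's inner loop, characterised: it succeeds iff the group is duplicate-free, inside 1..n and fresh
lemma pyA_inner_eq (n : Int) : ∀ (group : List Int) (seen : PySem.Set Int) (nums : List Int),
    pyA_inner n group seen nums =
      if group.Nodup ∧ ∀ x ∈ group, 1 ≤ x ∧ x ≤ n ∧ x ∉ seen
      then some (seen ++ group, nums ++ group) else none
  | [], seen, nums => by simp [pyA_inner]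
  | idx :: rest, seen, nums => by
    rw [pyA_inner]
    by_cases hbad : idx < 1 ∨ idx > n ∨ PySem.Set.contains seen idx
    · rw [if_pos hbad, if_neg]
      rintro ⟨hnd, hall⟩
      rcases hall idx (by simp) with ⟨h1, h2, h3⟩
      simp only [PySem.Set.contains, List.contains_iff_mem] at hbad
      rcases hbad with h | h | h
      · omega
      · omega
      · exact h3 h
    · rw [if_neg hbad]
      have hmem : idx ∉ seen := by
        simp only [PySem.Set.contains, List.contains_iff_mem] at hbad; tauto
      have hgood : 1 ≤ idx ∧ idx ≤ n :=
        ⟨by by_contra h; exact hbad (Or.inl (by omega)),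
         by by_contra h; exact hbad (Or.inr (Or.inl (by omega)))⟩
      have hadd : PySem.Set.add seen idx = seen ++ [idx] := by
        simp [PySem.Set.add, hmem]
      rw [hadd, pyA_inner_eq n rest]
      by_cases hc : rest.Nodup ∧ ∀ x ∈ rest, 1 ≤ x ∧ x ≤ n ∧ x ∉ seen ++ [idx]
      · rw [if_pos hc, if_pos]
        · simp
        · obtain ⟨hnd, hall⟩ := hc
          refine ⟨List.nodup_cons.mpr ⟨fun hm => ?_, hnd⟩, ?_⟩
          · rcases hall idx hm with ⟨_, _, h⟩; simp at h
          · intro x hx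
            rcases List.mem_cons.mp hx with rfl | hx
            · exact ⟨hgood.1, hgood.2, hmem⟩
            · rcases hall x hx with ⟨a, b, c⟩
              exact ⟨a, b, fun h => c (by simp [h])⟩
      · rw [if_neg hc, if_neg]
        rintro ⟨hnd, hall⟩
        apply hc
        refine ⟨(List.nodup_cons.mp hnd).2, fun x hx => ?_⟩
        rcases hall x (by simp [hx]) with ⟨a, b, c⟩
        refine ⟨a, b, fun h => ?_⟩
        rcases List.mem_append.mp h with h | h
        · exact c h
        · simp at h; subst h; exact (List.nodup_cons.mp hnd).1 hx

-- one step of B's loop, with the `nums` fold already evaluated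
lemma pyB_cons (n : Int) (group : List Int) (rest : List (List Int)) (e : Int) :
    pyB_loop n (group :: rest) e =
      if group.isEmpty then false
      else if group.length > 8 then false
      else if PySem.List.sorted group (fun x => x) false ≠
          PySem.List.pyRange e (e + group.length) 1 then false
      else pyB_loop n rest (e + group.length) := by
  rw [pyB_loop]
  simp only [PySem.List.foldl_append_singleton_eq_self, List.nil_append]

-- B's loop can never succeed once `expected` has overshot n + 1
lemma pyB_false (n : Int) : ∀ (groups : List (List Int)) (e : Int),
    n + 1 < e → pyB_loop n groups e = false
  | [], e => by
    intro h
    simp only [pyB_loop]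
    simp; omega
  | group :: rest, e => by
    intro h
    rw [pyB_cons]
    split_ifs
    · rfl
    · rfl
    · rfl
    · exact pyB_false n rest _ (by omega)

lemma getLast?_of_ne (l : List Int) (h : l ≠ []) : l.getLast? = some l.getLastI := by
  rw [List.getLast?_eq_some_getLast h, List.getLastI_eq_getLast?_getD,
    List.getLast?_eq_some_getLast h]
  rfl

lemma getElem?_zero_of_ne (l : List Int) (h : l ≠ []) : l[0]? = some l.headI := by
  cases l with
  | nil => simp at h
  | cons a t => simp

lemma headI_mem (l : List Int) (h : l ≠ []) : l.headI ∈ l := by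
  cases l with
  | nil => simp at h
  | cons a t => simp

-- clean shape of one step of A's outer loop when the inner loop succeeds
lemma pyA_cons_ok (n : Int) (group : List Int) (rest : List (List Int))
    (seen : PySem.Set Int) (m : Int)
    (hne : ¬ group.isEmpty) (h8 : ¬ group.length > 8)
    (hok : group.Nodup ∧ ∀ x ∈ group, 1 ≤ x ∧ x ≤ n ∧ x ∉ seen) :
    pyA_loop n (group :: rest) seen m =
      (if PySem.List.sorted group (fun x => x) false ≠
          PySem.List.pyRange (PySem.List.sorted group (fun x => x) false).headI
            ((PySem.List.sorted group (fun x => x) false).getLastI + 1) 1 then false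
      else if (PySem.List.sorted group (fun x => x) false).headI ≤ m then false
      else pyA_loop n rest (seen ++ group) (PySem.List.sorted group (fun x => x) false).getLastI) := by
  have hns : PySem.List.sorted group (fun x => x) false ≠ [] := by
    rw [Ne, PySem.List.sorted_eq_nil_iff]
    intro h; rw [h] at hne; simp at hne
  rw [pyA_loop, if_neg hne, if_neg h8, pyA_inner_eq, if_pos hok]
  simp only [List.nil_append]
  rw [show PySem.List.pyGet? (PySem.List.sorted group (fun x => x) false) 0 =
      some (PySem.List.sorted group (fun x => x) false).headI from by
    rw [PySem.List.pyGet?_zero, getElem?_zero_of_ne _ hns]]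
  rw [show PySem.List.pyGet? (PySem.List.sorted group (fun x => x) false) (-1) =
      some (PySem.List.sorted group (fun x => x) false).getLastI from by
    rw [PySem.List.pyGet?_neg_one, getLast?_of_ne _ hns]]
  rfl

-- one step of A's outer loop when the inner loop hits `return False`
lemma pyA_cons_bad (n : Int) (group : List Int) (rest : List (List Int))
    (seen : PySem.Set Int) (m : Int)
    (hbad : ¬ (group.Nodup ∧ ∀ x ∈ group, 1 ≤ x ∧ x ≤ n ∧ x ∉ seen)) :
    pyA_loop n (group :: rest) seen m = false := by
  rw [pyA_loop]
  split_ifs with h1 h2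
  · rfl
  · rfl
  · rw [pyA_inner_eq, if_neg hbad]

-- a duplicate-free list inside {1..n} missing some k there has fewer than n elements
lemma length_lt_of_missing (n k : Int) (seen : List Int) (hnd : seen.Nodup)
    (hsub : ∀ x ∈ seen, 1 ≤ x ∧ x ≤ n) (hk1 : 1 ≤ k) (hkn : k ≤ n) (hks : k ∉ seen) :
    (seen.length : Int) < n := by
  have hsubf : seen.toFinset ⊆ (Finset.Icc 1 n).erase k := by
    intro x hx
    rw [List.mem_toFinset] at hx
    rcases hsub x hx with ⟨a, b⟩
    exact Finset.mem_erase.mpr ⟨fun h => hks (h ▸ hx), Finset.mem_Icc.mpr ⟨a, b⟩⟩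
  have hcard := Finset.card_le_card hsubf
  rw [Finset.card_erase_of_mem (Finset.mem_Icc.mpr ⟨hk1, hkn⟩), Int.card_Icc] at hcard
  rw [List.toFinset_card_of_nodup hnd] at hcard
  omega

-- once a value k ≤ prev_max with 1 ≤ k ≤ n is missing from `seen`, A must end in False
lemma pyA_doomed (n : Int) : ∀ (groups : List (List Int)) (seen : PySem.Set Int) (m k : Int),
    seen.Nodup → (∀ x ∈ seen, 1 ≤ x ∧ x ≤ n) → 1 ≤ k → k ≤ n → k ≤ m → k ∉ seen →
    pyA_loop n groups seen m = false
  | [], seen => by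
    intro m k hnd hsub hk1 hkn hkm hks
    rw [pyA_loop]
    have := length_lt_of_missing n k seen hnd hsub hk1 hkn hks
    simp [PySem.Set.len]
    omega
  | group :: rest, seen => by
    intro m k hnd hsub hk1 hkn hkm hks
    by_cases hne : group.isEmpty
    · rw [pyA_loop, if_pos hne]
    by_cases h8 : group.length > 8
    · rw [pyA_loop, if_neg hne, if_pos h8]
    by_cases hok : group.Nodup ∧ ∀ x ∈ group, 1 ≤ x ∧ x ≤ n ∧ x ∉ seen
    · rw [pyA_cons_ok n group rest seen m hne h8 hok]
      set ns := PySem.List.sorted group (fun x => x) false with hnsdef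
      have hnsne : ns ≠ [] := by
        rw [hnsdef, Ne, PySem.List.sorted_eq_nil_iff]
        intro h; rw [h] at hne; simp at hne
      by_cases hchk : ns ≠ PySem.List.pyRange ns.headI (ns.getLastI + 1) 1
      · rw [if_pos hchk]
      rw [if_neg hchk]
      rw [not_not] at hchk
      by_cases hm : ns.headI ≤ m
      · rw [if_pos hm]
      rw [if_neg hm]
      have hmemg : ∀ x ∈ group, ns.headI ≤ x ∧ x ≤ ns.getLastI := by
        intro x hx
        have hxns : x ∈ ns := by rw [hnsdef, PySem.List.mem_sorted]; exact hx
        rw [hchk] at hxns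
        have := PySem.List.mem_pyRange_one.mp hxns
        omega
      have ha : ns.headI ∈ group := by
        rw [← PySem.List.mem_sorted (key := fun x => x) (rev := false), ← hnsdef]
        exact headI_mem ns hnsne
      have hhl := (hmemg _ ha).2
      apply pyA_doomed n rest (seen ++ group) ns.getLastI k
      · rw [List.nodup_append]
        refine ⟨hnd, hok.1, ?_⟩
        intro a ha b hb rfl
        exact (hok.2 a hb).2.2 ha
      · intro x hx
        rcases List.mem_append.mp hx with h | h
        · exact hsub x h
        · exact ⟨(hok.2 x h).1, (hok.2 x h).2.1⟩
      · exact hk1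
      · exact hkn
      · omega
      · intro hx
        rcases List.mem_append.mp hx with h | h
        · exact hks h
        · have := (hmemg _ h).1; omega
    · exact pyA_cons_bad n group rest seen m hok

-- main invariant: when `seen` is exactly {1..m}, A's loop agrees with B's with expected = m + 1
lemma pyA_eq_pyB (n : Int) : ∀ (groups : List (List Int)) (seen : PySem.Set Int) (m : Int),
    0 ≤ m → seen.Nodup → (∀ x, x ∈ seen ↔ 1 ≤ x ∧ x ≤ m) → (seen.length : Int) = m →
    pyA_loop n groups seen m = pyB_loop n groups (m + 1)
  | [], seen => by
    intro m h0 hnd hmem hlen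
    rw [pyA_loop, pyB_loop]
    simp only [PySem.Set.len]
    rw [hlen, Bool.eq_iff_iff]
    simp only [beq_iff_eq]
    omega
  | group :: rest, seen => by
    intro m h0 hnd hmem hlen
    rw [pyB_cons]
    by_cases hne : group.isEmpty
    · rw [pyA_loop, if_pos hne, if_pos hne]
    rw [if_neg hne]
    by_cases h8 : group.length > 8
    · rw [pyA_loop, if_neg hne, if_pos h8, if_pos h8]
    rw [if_neg h8]
    have hgne : group ≠ [] := by intro h; rw [h] at hne; simp at hne
    have hlge : 1 ≤ group.length := List.length_pos_of_ne_nil hgne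
    have hnsne : PySem.List.sorted group (fun x => x) false ≠ [] := by
      rw [Ne, PySem.List.sorted_eq_nil_iff]; exact hgne
    by_cases hB : PySem.List.sorted group (fun x => x) false
        = PySem.List.pyRange (m + 1) (m + 1 + group.length) 1
    · rw [if_neg (not_not_intro hB)]
      have hmemiff : ∀ x, x ∈ group ↔ m + 1 ≤ x ∧ x < m + 1 + group.length := by
        intro x
        rw [← PySem.List.mem_sorted (key := fun x => x) (rev := false), hB,
          PySem.List.mem_pyRange_one]
      have hgnd : group.Nodup := by
        rw [← (PySem.List.sorted_perm group (fun x => x) false).nodup_iff, hB]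
        exact PySem.List.nodup_pyRange_one _ _
      by_cases hn : m + group.length ≤ n
      · -- the contiguous block also fits below n: both loops advance in lockstep
        have hok : group.Nodup ∧ ∀ x ∈ group, 1 ≤ x ∧ x ≤ n ∧ x ∉ seen := by
          refine ⟨hgnd, fun x hx => ?_⟩
          have := (hmemiff x).mp hx
          refine ⟨by omega, by omega, fun hs => ?_⟩
          have := (hmem x).mp hs
          omega
        rw [pyA_cons_ok n group rest seen m hne h8 hok]
        have hhead : (PySem.List.sorted group (fun x => x) false).headI = m + 1 := by
          rw [hB, PySem.List.pyRange_one_cons (by omega)]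
          rfl
        have hlast : (PySem.List.sorted group (fun x => x) false).getLastI
            = m + group.length := by
          have h1 : (PySem.List.sorted group (fun x => x) false).getLast? =
              some ((PySem.List.sorted group (fun x => x) false).getLastI) :=
            getLast?_of_ne _ hnsne
          have h2 : (PySem.List.sorted group (fun x => x) false).getLast? =
              some (m + group.length) := by
            rw [hB, show m + 1 + (group.length : Int) = (m + group.length) + 1 by ring,
              PySem.List.pyRange_one_succ_right (by omega), List.getLast?_concat]
          rw [h1] at h2
          exact Option.some_inj.mp h2
        rw [hhead, hlast]
        rw [if_neg (not_not_intro (by rw [hB]; congr 1; ring))]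
        rw [if_neg (by omega)]
        rw [show m + 1 + (group.length : Int) = (m + group.length) + 1 by ring]
        apply pyA_eq_pyB n rest (seen ++ group) (m + group.length)
        · omega
        · rw [List.nodup_append]
          refine ⟨hnd, hgnd, ?_⟩
          intro a ha b hb rfl
          have h1 := (hmem a).mp ha
          have h2 := (hmemiff a).mp hb
          omega
        · intro x
          rw [List.mem_append, hmem, hmemiff]
          omega
        · rw [List.length_append]
          push_cast
          omega
      · -- the block overruns n: A's inner loop rejects, B overshoots n + 1
        have hbad : ¬ (group.Nodup ∧ ∀ x ∈ group, 1 ≤ x ∧ x ≤ n ∧ x ∉ seen) := by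
          rintro ⟨-, hall⟩
          have hmg : (m + (group.length : Int)) ∈ group := by
            rw [hmemiff]; omega
          have := (hall _ hmg).2.1
          omega
        rw [pyA_cons_bad n group rest seen m hbad, pyB_false n rest _ (by omega)]
    · rw [if_pos hB]
      by_cases hok : group.Nodup ∧ ∀ x ∈ group, 1 ≤ x ∧ x ≤ n ∧ x ∉ seen
      · rw [pyA_cons_ok n group rest seen m hne h8 hok]
        set ns := PySem.List.sorted group (fun x => x) false with hnsdef
        by_cases hchk : ns ≠ PySem.List.pyRange ns.headI (ns.getLastI + 1) 1
        · rw [if_pos hchk]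
        rw [if_neg hchk, not_not] at *
        by_cases hm : ns.headI ≤ m
        · rw [if_pos hm]
        rw [if_neg hm]
        -- the block is contiguous but starts above m + 1: the gap at m + 1 dooms A
        have hmemg : ∀ x ∈ group, ns.headI ≤ x ∧ x ≤ ns.getLastI := by
          intro x hx
          have hxns : x ∈ ns := by rw [hnsdef, PySem.List.mem_sorted]; exact hx
          rw [hchk] at hxns
          have := PySem.List.mem_pyRange_one.mp hxns
          omega
        have ha : ns.headI ∈ group := by
          rw [← PySem.List.mem_sorted (key := fun x => x) (rev := false), ← hnsdef]
          exact headI_mem ns hnsne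
        have han : ns.headI ≤ n := (hok.2 _ ha).2.1
        have hlen2 : ns.length = (ns.getLastI + 1 - ns.headI).toNat := by
          conv_lhs => rw [hchk]
          rw [PySem.List.length_pyRange_one]
        have hlen3 : ns.length = group.length :=
          (PySem.List.sorted_perm group (fun x => x) false).length_eq
        have hab := (hmemg _ ha).2
        have hne2 : ns.headI ≠ m + 1 := by
          intro heq
          apply hB
          rw [hchk, heq]
          congr 1
          omega
        apply pyA_doomed n rest (seen ++ group) ns.getLastI (m + 1)
        · rw [List.nodup_append]
          refine ⟨hnd, hok.1, ?_⟩
          intro a hsa b hb rfl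
          exact (hok.2 a hb).2.2 hsa
        · intro x hx
          rcases List.mem_append.mp hx with h | h
          · have := (hmem x).mp h; omega
          · exact ⟨(hok.2 x h).1, (hok.2 x h).2.1⟩
        · omega
        · omega
        · have := (hmemg _ ha).2; omega
        · intro hx
          rcases List.mem_append.mp hx with h | h
          · have := (hmem _).mp h; omega
          · have := (hmemg _ h).1; omega
      · rw [pyA_cons_bad n group rest seen m hok]

-- ===== VERDICT (by name: the statement is the Claim_ definition above) =====
theorem validate_merge_groups_py_spec : Claim_equal_validate_merge_groups_py := by
  intro groups n _
  unfold Spec_validate_merge_groups_py validate_merge_groups_py validate_merge_groups_py_alt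
  have h := pyA_eq_pyB n groups PySem.Set.empty 0 le_rfl (by simp [PySem.Set.empty])
    (by intro x; simp [PySem.Set.empty]; omega) (by simp [PySem.Set.empty])
  simpa using h
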